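-- pv_equiv track=rewrite | github.com/thealper2/codewars-solutions | 7-kyu/simple_fun_173_a_hero_go_to_the_school.py | which_bus_to_take
-- ===== SOURCE A (Python) =====
-- def which_bus_to_take(buses_colors, going_to_school):
--     for i in range(len(buses_colors)):
--         if going_to_school[i]:
--             if buses_colors[i] == "red":
--                 return i
--
--     for i in range(len(buses_colors)):
--         if going_to_school[i]:
--             if buses_colors[i] == "blue":
--                 return i
--
--     return -1
-- ===== SOURCE B (Python) =====
-- def which_bus_to_take(buses_colors, going_to_school):
--     first_blue = -1
--     for i in range(len(buses_colors)):
--         if going_to_school[i]: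
--             if buses_colors[i] == "red":
--                 return i
--             if buses_colors[i] == "blue" and first_blue < 0:
--                 first_blue = i
--     return first_blue
-- ===== Notes on version B (the rewrite author's own statement) =====
-- stated objective: simpler
-- what changed: Replaced A's two full passes (one for the first red, one for the first blue) by a single pass that returns immediately on a going-to-school red and maintains a first-blue candidate in an accumulator.
import Mathlib
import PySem

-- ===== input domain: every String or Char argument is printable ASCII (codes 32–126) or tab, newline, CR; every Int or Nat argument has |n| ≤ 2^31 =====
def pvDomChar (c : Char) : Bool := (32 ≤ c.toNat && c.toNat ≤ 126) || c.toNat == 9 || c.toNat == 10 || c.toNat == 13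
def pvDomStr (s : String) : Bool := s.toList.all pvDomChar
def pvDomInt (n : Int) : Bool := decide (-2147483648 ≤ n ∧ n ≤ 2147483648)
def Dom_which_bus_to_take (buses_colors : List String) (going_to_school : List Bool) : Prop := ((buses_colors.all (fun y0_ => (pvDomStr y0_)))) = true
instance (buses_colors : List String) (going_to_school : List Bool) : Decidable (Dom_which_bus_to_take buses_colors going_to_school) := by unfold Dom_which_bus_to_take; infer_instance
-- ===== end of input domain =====

-- B replaces A's two full passes by one pass keeping a first-blue candidate (objective: simpler).
-- Inside Pre_ every index access is in range, so `List.getD` below is exactly Python's `xs[i]`.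

-- ===== PORT A =====
-- A: first loop returns the first i with going_to_school[i] and buses_colors[i]=="red",
-- second loop the first such "blue", else -1.  Each early-return loop over range(len) is find? on the index range.
def which_bus_to_take (buses_colors : List String) (going_to_school : List Bool) : Int :=
  match (List.range buses_colors.length).find?
      (fun i => going_to_school.getD i false && (buses_colors.getD i "" == "red")) with
  | some i => (i : Int)
  | none =>
    match (List.range buses_colors.length).find?
        (fun i => going_to_school.getD i false && (buses_colors.getD i "" == "blue")) with
    | some i => (i : Int)
    | none => -1

-- ===== PORT B =====
-- B: single indexed loop with accumulator first_blue (fb); returns i at once on a red.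
def which_bus_to_take_alt_go (buses_colors : List String) (going_to_school : List Bool)
    (i : Nat) (fb : Int) : Int :=
  if _h : i < buses_colors.length then
    if going_to_school.getD i false then
      if buses_colors.getD i "" == "red" then (i : Int)
      else if buses_colors.getD i "" == "blue" ∧ fb < 0 then
        which_bus_to_take_alt_go buses_colors going_to_school (i + 1) (i : Int)
      else which_bus_to_take_alt_go buses_colors going_to_school (i + 1) fb
    else which_bus_to_take_alt_go buses_colors going_to_school (i + 1) fb
  else fb
termination_by buses_colors.length - i

def which_bus_to_take_alt (buses_colors : List String) (going_to_school : List Bool) : Int :=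
  which_bus_to_take_alt_go buses_colors going_to_school 0 (-1)

-- ===== PRECONDITION & SPEC =====
-- Pre_ excludes exactly the inputs where Python A (and B) raise IndexError: going_to_school
-- shorter than buses_colors with no going-to-school red bus inside the readable prefix.
def Pre_which_bus_to_take (buses_colors : List String) (going_to_school : List Bool) : Prop :=
  buses_colors.length ≤ going_to_school.length ∨
    ((List.range going_to_school.length).any
      (fun i => going_to_school.getD i false && (buses_colors.getD i "" == "red"))) = true
instance (buses_colors : List String) (going_to_school : List Bool) : Decidable (Pre_which_bus_to_take buses_colors going_to_school) := by unfold Pre_which_bus_to_take; infer_instance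

def pvWitness_which_bus_to_take : List String × List Bool := (["blue", "red", "green"], [true, true, true])

def Spec_which_bus_to_take (buses_colors : List String) (going_to_school : List Bool) (out : Int) : Prop := out = which_bus_to_take_alt buses_colors going_to_school
instance (buses_colors : List String) (going_to_school : List Bool) (out : Int) : Decidable (Spec_which_bus_to_take buses_colors going_to_school out) := by unfold Spec_which_bus_to_take; infer_instance

-- ===== CLAIM (what is proved, stated in full; the proofs are below) =====
def Claim_equal_which_bus_to_take : Prop := ∀ (buses_colors : List String) (going_to_school : List Bool), Dom_which_bus_to_take buses_colors going_to_school → Pre_which_bus_to_take buses_colors going_to_school → Spec_which_bus_to_take buses_colors going_to_school (which_bus_to_take buses_colors going_to_school)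

-- ===== LEMMAS AND PROOFS =====

-- Characterisation of B's loop from position i with accumulator fb (fb < 0 only as -1):
-- the first red at or after i wins; otherwise fb if already set; otherwise the first blue at or after i; else -1.
theorem alt_go_eq (buses_colors : List String) (going_to_school : List Bool) :
    ∀ (n i : Nat) (fb : Int), buses_colors.length - i = n → (fb < 0 → fb = -1) →
    which_bus_to_take_alt_go buses_colors going_to_school i fb =
      match (List.range' i n).find?
          (fun j => going_to_school.getD j false && (buses_colors.getD j "" == "red")) with
      | some k => (k : Int)
      | none =>
        if fb < 0 then
          match (List.range' i n).find?
              (fun j => going_to_school.getD j false && (buses_colors.getD j "" == "blue")) with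
          | some k => (k : Int)
          | none => -1
        else fb := by
  intro n
  induction n with
  | zero =>
    intro i fb hn hfb
    unfold which_bus_to_take_alt_go
    have hi : ¬ i < buses_colors.length := by omega
    simp [hi, List.range']
    intro h; exact hfb h
  | succ n ih =>
    intro i fb hn hfb
    have hi : i < buses_colors.length := by omega
    have hrec : buses_colors.length - (i + 1) = n := by omega
    unfold which_bus_to_take_alt_go
    simp only [hi, dif_pos, List.range'_succ, List.find?_cons, List.getD_eq_getElem?_getD]
    by_cases hg : going_to_school[i]?.getD false
    · by_cases hr : buses_colors[i]?.getD "" == "red"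
      · simp [hg, hr]
      · by_cases hbfb : (buses_colors[i]?.getD "" == "blue") = true ∧ fb < 0
        · have hfb' : fb = -1 := hfb hbfb.2
          rw [if_pos hg, if_neg (by simpa using hr), if_pos hbfb,
              ih (i + 1) (i : Int) hrec (by omega)]
          have hnn : ¬ ((i : Int) < 0) := by omega
          simp [List.getD_eq_getElem?_getD, hg, hr, hbfb.1, hfb', hnn]
        · rw [if_pos hg, if_neg (by simpa using hr), if_neg hbfb,
              ih (i + 1) fb hrec hfb]
          by_cases hb : buses_colors[i]?.getD "" == "blue"
          · have hfbge : ¬ fb < 0 := fun h => hbfb ⟨hb, h⟩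
            simp [List.getD_eq_getElem?_getD, hg, hr, hfbge]
          · simp [List.getD_eq_getElem?_getD, hg, hr, hb]
    · rw [if_neg (by simpa using hg), ih (i + 1) fb hrec hfb]
      simp [List.getD_eq_getElem?_getD, hg]

-- ===== VERDICT (by name: the statement is the Claim_ definition above) =====
theorem which_bus_to_take_spec : Claim_equal_which_bus_to_take := by
  intro bc gs _ _
  unfold Spec_which_bus_to_take which_bus_to_take which_bus_to_take_alt
  rw [alt_go_eq bc gs bc.length 0 (-1) (by omega) (fun _ => rfl)]
  simp [List.range_eq_range']
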